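-- pv_equiv track=rewrite | github.com/Sabaka18/ROAD_GUARDS_SABA_2 | prioritization_service.py | _location_score
-- ===== SOURCE A (Python) =====
-- LOCATION_KEYWORDS = [
--     (["school", "مدرسة"],               20),  # school zones — highest priority
--     (["hospital", "مستشفى"],            20),  # hospitals
--     (["intersection", "تقاطع"],         18),  # intersections
--     (["highway", "طريق سريع", "freeway"], 16), # highways
--     (["main", "رئيسي", "central"],      12),  # main roads
--     (["residential", "سكني"],            8),  # residential
-- ]
--
-- DEFAULT_LOCATION_SCORE = 8
--
-- def _location_score(location: str | None) -> int:
--     if not location: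
--         return DEFAULT_LOCATION_SCORE
--     location_lower = location.lower()
--     for keywords, score in LOCATION_KEYWORDS:
--         if any(kw.lower() in location_lower for kw in keywords):
--             return score
--     return DEFAULT_LOCATION_SCORE
-- ===== SOURCE B (Python) =====
-- LOCATION_KEYWORDS = [
--     (["school", "مدرسة"],               20),
--     (["hospital", "مستشفى"],            20),
--     (["intersection", "تقاطع"],         18),
--     (["highway", "طريق سريع", "freeway"], 16),
--     (["main", "رئيسي", "central"],      12),
--     (["residential", "سكني"],            8),
-- ]
--
-- DEFAULT_LOCATION_SCORE = 8
--
--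
-- def _location_score(location):
--     # collect-then-reduce: gather every matching group's score, take the max
--     if not location:
--         return DEFAULT_LOCATION_SCORE
--     low = location.lower()
--     matched = [score for keywords, score in LOCATION_KEYWORDS
--                if any(kw.lower() in low for kw in keywords)]
--     return max(matched, default=DEFAULT_LOCATION_SCORE)
-- ===== Notes on version B (the rewrite author's own statement) =====
-- stated objective: alternative
-- what changed: Replaces A's first-match short-circuit loop over the keyword table with a collect-then-reduce pass: build the list of scores of ALL matching groups and return its max (default 8); equal because the table's scores are non-increasing.
import Mathlib
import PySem

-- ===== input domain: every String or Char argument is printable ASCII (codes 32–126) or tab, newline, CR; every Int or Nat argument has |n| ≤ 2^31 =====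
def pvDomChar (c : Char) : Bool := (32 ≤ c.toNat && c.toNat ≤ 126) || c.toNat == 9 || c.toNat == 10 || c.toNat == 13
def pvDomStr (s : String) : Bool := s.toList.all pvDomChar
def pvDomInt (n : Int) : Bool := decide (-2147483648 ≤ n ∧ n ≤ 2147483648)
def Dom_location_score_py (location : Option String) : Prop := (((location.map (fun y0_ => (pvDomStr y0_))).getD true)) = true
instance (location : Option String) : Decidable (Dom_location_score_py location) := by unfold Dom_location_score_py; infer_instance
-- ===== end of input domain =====

-- B replaces A's first-match short-circuit over the keyword table with a collect-all-matching-scores-then-max pass (equal since scores are non-increasing); alternative decomposition, same cost.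


-- ===== PORT A =====
-- module constant LOCATION_KEYWORDS (shared verbatim by both Pythons)
def pvLocationKeywords : List (List String × Int) :=
  [ (["school", "مدرسة"],               20),
    (["hospital", "مستشفى"],            20),
    (["intersection", "تقاطع"],         18),
    (["highway", "طريق سريع", "freeway"], 16),
    (["main", "رئيسي", "central"],      12),
    (["residential", "سكني"],            8) ]

-- A's 'for keywords, score in LOCATION_KEYWORDS: if any(...): return score'
def pvScanA (low : String) : List (List String × Int) → Int
  | [] => 8
  | (kws, score) :: rest =>
    if kws.any (fun kw => PySem.Str.isIn (PySem.Str.lower kw) low) then score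
    else pvScanA low rest

def location_score_py (location : Option String) : Int :=
  match location with
  | none => 8
  | some s => if s = "" then 8 else pvScanA (PySem.Str.lower s) pvLocationKeywords

-- ===== PORT B =====
def location_score_py_alt (location : Option String) : Int :=
  match location with
  | none => 8
  | some s =>
    if s = "" then 8
    else
      let low := PySem.Str.lower s
      let matched :=
        (pvLocationKeywords.filter
          (fun g => g.1.any (fun kw => PySem.Str.isIn (PySem.Str.lower kw) low))).map (·.2)
      PySem.List.maxD matched id 8

-- ===== PRECONDITION & SPEC =====
def Spec_location_score_py (location : Option String) (out : Int) : Prop := out = location_score_py_alt location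
instance (location : Option String) (out : Int) : Decidable (Spec_location_score_py location out) := by unfold Spec_location_score_py; infer_instance

-- ===== CLAIM (what is proved, stated in full; the proofs are below) =====
def Claim_equal_location_score_py : Prop := ∀ (location : Option String), Dom_location_score_py location → Spec_location_score_py location (location_score_py location)

-- ===== LEMMAS AND PROOFS =====
-- the table's scores are non-increasing, so first match = max of all matches:
-- case-bash the six per-group match booleans
theorem pvScan_eq_maxD (low : String) :
    pvScanA low pvLocationKeywords =
      PySem.List.maxD
        ((pvLocationKeywords.filter
          (fun g => g.1.any (fun kw => PySem.Str.isIn (PySem.Str.lower kw) low))).map (·.2)) id 8 := by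
  simp only [pvLocationKeywords]
  cases h1 : (["school", "مدرسة"] : List String).any (fun kw => PySem.Str.isIn (PySem.Str.lower kw) low) <;>
  cases h2 : (["hospital", "مستشفى"] : List String).any (fun kw => PySem.Str.isIn (PySem.Str.lower kw) low) <;>
  cases h3 : (["intersection", "تقاطع"] : List String).any (fun kw => PySem.Str.isIn (PySem.Str.lower kw) low) <;>
  cases h4 : (["highway", "طريق سريع", "freeway"] : List String).any (fun kw => PySem.Str.isIn (PySem.Str.lower kw) low) <;>
  cases h5 : (["main", "رئيسي", "central"] : List String).any (fun kw => PySem.Str.isIn (PySem.Str.lower kw) low) <;>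
  cases h6 : (["residential", "سكني"] : List String).any (fun kw => PySem.Str.isIn (PySem.Str.lower kw) low) <;>
  simp only [pvScanA, List.filter_cons, List.filter_nil, h1, h2, h3, h4, h5, h6] <;> decide

-- ===== VERDICT (by name: the statement is the Claim_ definition above) =====
theorem location_score_py_spec : Claim_equal_location_score_py := by
  intro location _
  unfold Spec_location_score_py location_score_py location_score_py_alt
  cases location with
  | none => rfl
  | some s =>
    by_cases hs : s = "" <;> simp [hs, pvScan_eq_maxD]
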